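-- pv_equiv track=rewrite | github.com/GEMP-UFC-Crateus/obi | Nível 01/2007/metro.py | tamanho_maximo_fatia
-- ===== SOURCE A (Python) =====
-- def tamanho_maximo_fatia(N, tamanhos_paes):
--     """Encontra o tamanho máximo da fatia que pode ser cortada para atender a todos.
--
--     Args:
--         N: O número de pessoas a serem atendidas.
--         tamanhos_paes: Uma lista com os tamanhos dos pães.
--
--     Returns:
--         O tamanho máximo da fatia (inteiro).
--     """
--
--     # Define os limites da busca binária
--     inicio = 1
--     fim = max(tamanhos_paes)
--
--     while inicio <= fim:
--         meio = (inicio + fim) // 2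
--         fatias_obtidas = sum(tamanho // meio for tamanho in tamanhos_paes)
--
--         if fatias_obtidas >= N:
--             inicio = meio + 1  # Tenta um tamanho maior
--         else:
--             fim = meio - 1  # Precisa de um tamanho menor
--
--     return fim  # O último tamanho válido encontrado é o máximo
-- ===== SOURCE B (Python) =====
-- def tamanho_maximo_fatia(N, tamanhos_paes):
--     """Maior tamanho de fatia cujo total de fatias atende N pessoas.
--
--     Varre os tamanhos em ordem decrescente, pulando diretamente entre os
--     pontos em que algum quociente t // meio muda de valor.
--     """
--     meio = max(tamanhos_paes)
--     while meio >= 1: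
--         if sum(t // meio for t in tamanhos_paes) >= N:
--             return meio
--         meio = max(t // (t // meio + 1) for t in tamanhos_paes)
--     return 0
-- ===== Notes on version B (the rewrite author's own statement) =====
-- stated objective: alternative
-- what changed: Replaces binary search over the answer (inicio/meio/fim bisection bookkeeping) with a descending scan that jumps between the breakpoints where some quotient t // meio changes, returning the first size that serves N people and falling back to 0; Pre_ excludes the empty list (A raises) and lists containing a negative size except when N is trivially reachable, because with negative sizes the slice count is non-monotone (no largest valid size is specified) and B's breakpoint step may divide by zero there.
-- outside the precondition, e.g. on tamanho_maximo_fatia(2, [-3]): A returns -3, B returns 0; on tamanho_maximo_fatia(3, [3, -1]): A returns 0, B raises ZeroDivisionError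
import Mathlib
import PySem

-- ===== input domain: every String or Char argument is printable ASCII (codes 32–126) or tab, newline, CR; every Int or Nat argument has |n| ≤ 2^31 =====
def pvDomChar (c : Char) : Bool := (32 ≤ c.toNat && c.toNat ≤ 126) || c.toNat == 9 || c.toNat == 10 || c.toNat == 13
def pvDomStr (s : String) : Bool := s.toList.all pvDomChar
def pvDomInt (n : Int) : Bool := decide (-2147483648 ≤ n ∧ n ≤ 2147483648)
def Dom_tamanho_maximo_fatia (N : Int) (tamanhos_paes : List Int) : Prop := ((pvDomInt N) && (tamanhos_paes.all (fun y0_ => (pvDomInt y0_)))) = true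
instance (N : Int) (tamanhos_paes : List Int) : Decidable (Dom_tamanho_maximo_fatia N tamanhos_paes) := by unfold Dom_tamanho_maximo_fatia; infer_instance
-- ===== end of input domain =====

-- B replaces A's binary search on the answer with a descending scan of the slice size that jumps between the
-- breakpoints where some quotient changes (no bisection bookkeeping). Pre_ admits the natural domain (nonempty,
-- nonnegative sizes) plus lists whose N is trivially reachable; it excludes the empty list (A raises) and other
-- lists with a negative size, where the slice count is non-monotone and B's breakpoint step may divide by zero.


-- ===== PORT A =====
-- sum(tamanho // meio for tamanho in tamanhos_paes)
def fatiasObtidas (tamanhos_paes : List Int) (meio : Int) : Int :=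
  tamanhos_paes.foldl (fun acc tamanho => acc + PySem.Int.floordiv tamanho meio) 0

-- the 'while inicio <= fim' binary-search loop of A
def buscaLoop (N : Int) (tamanhos_paes : List Int) (inicio fim : Int) : Int :=
  if h : inicio ≤ fim then
    let meio := PySem.Int.floordiv (inicio + fim) 2
    if fatiasObtidas tamanhos_paes meio ≥ N then
      buscaLoop N tamanhos_paes (meio + 1) fim
    else
      buscaLoop N tamanhos_paes inicio (meio - 1)
  else fim
termination_by (fim + 1 - inicio).toNat
decreasing_by
  · have := PySem.Int.floordiv_two_mid_bounds h
    omega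
  · have := PySem.Int.floordiv_two_mid_bounds h
    omega

def tamanho_maximo_fatia (N : Int) (tamanhos_paes : List Int) : Int :=
  match PySem.List.max? tamanhos_paes (fun y => y) with
  | none => 0  -- Python: max([]) raises ValueError; excluded by Pre_
  | some fim => buscaLoop N tamanhos_paes 1 fim

-- ===== PORT B =====
-- "t // (t // meio + 1)": the largest slice size below meio at which t // x changes value
def proxCand (t meio : Int) : Int :=
  PySem.Int.floordiv t (PySem.Int.floordiv t meio + 1)

-- "meio = max(t // (t // meio + 1) for t in tamanhos_paes)"
def proxSalto (ts : List Int) (meio : Int) : Int :=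
  match PySem.List.max? (ts.map (fun t => proxCand t meio)) (fun y => y) with
  | none => 0  -- Python: max of an empty generator raises; excluded by Pre_
  | some p => p

-- "while meio >= 1: …"; the fuel only makes the recursion structural, it is never
-- exhausted on admitted inputs (each jump strictly decreases meio there)
def saltoLoop (N : Int) (ts : List Int) : Nat → Int → Int
  | 0, _ => 0
  | fuel + 1, meio =>
    if 1 ≤ meio then
      if fatiasObtidas ts meio ≥ N then meio
      else saltoLoop N ts fuel (proxSalto ts meio)
    else 0

def tamanho_maximo_fatia_alt (N : Int) (tamanhos_paes : List Int) : Int :=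
  match PySem.List.max? tamanhos_paes (fun y => y) with
  | none => 0  -- Python: max([]) raises ValueError; excluded by Pre_
  | some meio => saltoLoop N tamanhos_paes (meio.toNat + 1) meio

-- ===== PRECONDITION & SPEC =====
-- worst-case element-wise lower bound on the slice count, used only to state Pre_ in closed form
def lowSum (ts : List Int) : Int := (ts.map (fun t => if t < 0 then t else 0)).sum

-- Pre_ excludes the empty list (A raises ValueError in max) and lists containing a negative size: bread sizes are
-- naturally nonnegative, and with a negative size the slice count is not monotone in the slice size, so no slice
-- size is "the" largest valid one (A's answer there is one arbitrary choice) and B's breakpoint step may divide by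
-- zero. Lists with a negative size stay admitted when N is trivially reachable (N ≤ lowSum: both return the maximum).
def Pre_tamanho_maximo_fatia (N : Int) (tamanhos_paes : List Int) : Prop :=
  tamanhos_paes ≠ [] ∧
    ((∀ t ∈ tamanhos_paes, 0 ≤ t) ∨
     ((∃ t ∈ tamanhos_paes, 1 ≤ t) ∧ N ≤ lowSum tamanhos_paes))
instance (N : Int) (tamanhos_paes : List Int) : Decidable (Pre_tamanho_maximo_fatia N tamanhos_paes) := by
  unfold Pre_tamanho_maximo_fatia; infer_instance

def pvWitness_tamanho_maximo_fatia : Int × List Int := (7, [5, 3, 4])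

def Spec_tamanho_maximo_fatia (N : Int) (tamanhos_paes : List Int) (out : Int) : Prop := out = tamanho_maximo_fatia_alt N tamanhos_paes
instance (N : Int) (tamanhos_paes : List Int) (out : Int) : Decidable (Spec_tamanho_maximo_fatia N tamanhos_paes out) := by unfold Spec_tamanho_maximo_fatia; infer_instance

-- ===== CLAIM (what is proved, stated in full; the proofs are below) =====
def Claim_equal_tamanho_maximo_fatia : Prop := ∀ (N : Int) (tamanhos_paes : List Int), Dom_tamanho_maximo_fatia N tamanhos_paes → Pre_tamanho_maximo_fatia N tamanhos_paes → Spec_tamanho_maximo_fatia N tamanhos_paes (tamanho_maximo_fatia N tamanhos_paes)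

-- ===== LEMMAS AND PROOFS =====

-- ghost linear descending scan: the specification both loops are reduced to
def varreLoop (N : Int) (ts : List Int) (meio : Int) : Int :=
  if 1 ≤ meio then
    if fatiasObtidas ts meio ≥ N then meio
    else varreLoop N ts (meio - 1)
  else 0
termination_by meio.toNat

theorem proxCand_nonneg (t meio : Int) (ht : 0 ≤ t) (hm : 1 ≤ meio) : 0 ≤ proxCand t meio := by
  have hq : 0 ≤ PySem.Int.floordiv t meio := by
    rw [PySem.Int.le_floordiv_iff_mul_le (by omega)]; omega
  unfold proxCand
  rw [PySem.Int.le_floordiv_iff_mul_le (by omega)]; omega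

theorem proxCand_lt (t meio : Int) (ht : 0 ≤ t) (hm : 1 ≤ meio) : proxCand t meio < meio := by
  have hm0 : (0:Int) < meio := by omega
  have hq : 0 ≤ PySem.Int.floordiv t meio := by
    rw [PySem.Int.le_floordiv_iff_mul_le hm0]; omega
  have hbr := (PySem.Int.floordiv_eq_iff_of_pos hm0).mp
    (rfl : PySem.Int.floordiv t meio = PySem.Int.floordiv t meio)
  unfold proxCand
  rw [PySem.Int.floordiv_lt_iff_lt_mul (by omega)]
  nlinarith [hbr.2]

-- each quotient t // x is unchanged for x in (proxCand t m, m]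
theorem fd_const (t m x : Int) (ht : 0 ≤ t) (hx1 : 1 ≤ x) (hxm : x ≤ m) (hc : proxCand t m < x) :
    PySem.Int.floordiv t x = PySem.Int.floordiv t m := by
  have hm0 : (0:Int) < m := by omega
  have hx0 : (0:Int) < x := by omega
  have hq : 0 ≤ PySem.Int.floordiv t m := by
    rw [PySem.Int.le_floordiv_iff_mul_le hm0]; omega
  have hbr := (PySem.Int.floordiv_eq_iff_of_pos hm0).mp
    (rfl : PySem.Int.floordiv t m = PySem.Int.floordiv t m)
  unfold proxCand at hc
  have h2 : t < x * (PySem.Int.floordiv t m + 1) := by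
    rw [← PySem.Int.floordiv_lt_iff_lt_mul (by omega)]; exact hc
  rw [PySem.Int.floordiv_eq_iff_of_pos hx0]
  constructor
  · nlinarith [hbr.1]
  · nlinarith

-- the jump target collects the candidates: nonnegative, below meio, and an upper bound for each of them
theorem proxSalto_spec (ts : List Int) (meio : Int) (hne : ts ≠ []) (hts : ∀ t ∈ ts, 0 ≤ t)
    (hm : 1 ≤ meio) :
    0 ≤ proxSalto ts meio ∧ proxSalto ts meio < meio ∧
      ∀ t ∈ ts, proxCand t meio ≤ proxSalto ts meio := by
  unfold proxSalto
  cases hmax : PySem.List.max? (ts.map (fun t => proxCand t meio)) (fun y => y) with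
  | none =>
    exact absurd (List.map_eq_nil_iff.mp ((PySem.List.max?_eq_none_iff _ _).mp hmax)) hne
  | some p =>
    have hpm := PySem.List.max?_mem hmax
    obtain ⟨t0, ht0, hpe⟩ := List.mem_map.mp hpm
    subst hpe
    refine ⟨proxCand_nonneg t0 meio (hts t0 ht0) hm, proxCand_lt t0 meio (hts t0 ht0) hm, ?_⟩
    intro t ht
    exact PySem.List.max?_isMax hmax _ (List.mem_map.mpr ⟨t, ht, rfl⟩)

-- the slice count itself is constant on (proxSalto ts m, m]
theorem fatias_const (ts : List Int) (m x : Int) (hne : ts ≠ []) (hts : ∀ t ∈ ts, 0 ≤ t)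
    (hm : 1 ≤ m) (hx1 : 1 ≤ x) (hxm : x ≤ m) (hc : proxSalto ts m < x) :
    fatiasObtidas ts x = fatiasObtidas ts m := by
  unfold fatiasObtidas
  rw [PySem.List.foldl_add, PySem.List.foldl_add]
  simp only [zero_add]
  exact congrArg List.sum (List.map_congr_left fun t ht =>
    fd_const t m x (hts t ht) hx1 hxm
      (lt_of_le_of_lt ((proxSalto_spec ts m hne hts hm).2.2 t ht) hc))

-- slice count is antitone in the slice size, for nonneg sizes and positive divisors
theorem fatias_antitone (ts : List Int) (hts : ∀ t ∈ ts, 0 ≤ t) {a b : Int}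
    (ha : 1 ≤ a) (hab : a ≤ b) : fatiasObtidas ts b ≤ fatiasObtidas ts a := by
  unfold fatiasObtidas
  rw [PySem.List.foldl_add, PySem.List.foldl_add]
  simp only [zero_add]
  apply List.sum_le_sum
  intro t htmem
  have ht1 := hts t htmem
  rw [PySem.Int.floordiv_eq_ediv_of_pos (by omega), PySem.Int.floordiv_eq_ediv_of_pos (by omega)]
  have hb : (0:Int) < b := by omega
  rw [Int.le_ediv_iff_mul_le (by omega : (0:Int) < a)]
  calc t / b * a ≤ t / b * b :=
        mul_le_mul_of_nonneg_left hab (Int.ediv_nonneg (by omega) hb.le)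
    _ ≤ t := Int.ediv_mul_le t (by omega)

-- if every size in (g, m] fails, the scan from m equals the scan from g
theorem varreLoop_skip (N : Int) (ts : List Int) {g m : Int} (hg : 0 ≤ g) (hgm : g ≤ m)
    (hfail : ∀ k, g < k → k ≤ m → fatiasObtidas ts k < N) :
    varreLoop N ts m = varreLoop N ts g := by
  have key : ∀ n : Nat, ∀ m : Int, g ≤ m → (m - g).toNat = n →
      (∀ k, g < k → k ≤ m → fatiasObtidas ts k < N) →
      varreLoop N ts m = varreLoop N ts g := by
    intro n
    induction n with
    | zero =>
      intro m hgm hn _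
      have : m = g := by omega
      rw [this]
    | succ n ih =>
      intro m hgm hn hfail
      have hm1 : 1 ≤ m := by omega
      rw [varreLoop, if_pos hm1, if_neg (by exact not_le.mpr (hfail m (by omega) le_rfl))]
      exact ih (m - 1) (by omega) (by omega) (fun k hk1 hk2 => hfail k hk1 (by omega))
  exact key (m - g).toNat m hgm rfl hfail

-- the jump scan equals the linear descending scan (fuel is never exhausted: meio strictly decreases)
theorem saltoLoop_eq_varre (N : Int) (ts : List Int) (hne : ts ≠ []) (hts : ∀ t ∈ ts, 0 ≤ t) :
    ∀ fuel : Nat, ∀ meio : Int, 0 ≤ meio → meio.toNat < fuel →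
      saltoLoop N ts fuel meio = varreLoop N ts meio := by
  intro fuel
  induction fuel with
  | zero => intro meio _ h; omega
  | succ fuel ih =>
    intro meio hm0 hf
    rw [saltoLoop, varreLoop]
    by_cases hm : 1 ≤ meio
    · rw [if_pos hm, if_pos hm]
      by_cases hge : fatiasObtidas ts meio ≥ N
      · rw [if_pos hge, if_pos hge]
      · rw [if_neg hge, if_neg hge]
        have hps := proxSalto_spec ts meio hne hts hm
        rw [ih (proxSalto ts meio) hps.1 (by omega)]
        exact (varreLoop_skip N ts hps.1 (by omega) (fun k hk1 hk2 => by
          rw [fatias_const ts meio k hne hts hm (by omega) (by omega) hk1]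
          omega)).symm
    · rw [if_neg hm, if_neg hm]

-- main invariant: the binary-search loop computes the linear scan's answer
theorem buscaLoop_eq (N : Int) (ts : List Int) (hts : ∀ t ∈ ts, 0 ≤ t) (M : Int)
    (inicio fim : Int)
    (h1 : 1 ≤ inicio) (h2 : inicio ≤ fim + 1) (h3 : fim ≤ M)
    (h4 : inicio = 1 ∨ fatiasObtidas ts (inicio - 1) ≥ N)
    (h5 : ∀ k, fim < k → k ≤ M → fatiasObtidas ts k < N) :
    buscaLoop N ts inicio fim = varreLoop N ts M := by
  have key : ∀ n : Nat, ∀ inicio fim : Int, (fim + 1 - inicio).toNat = n →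
      1 ≤ inicio → inicio ≤ fim + 1 → fim ≤ M →
      (inicio = 1 ∨ fatiasObtidas ts (inicio - 1) ≥ N) →
      (∀ k, fim < k → k ≤ M → fatiasObtidas ts k < N) →
      buscaLoop N ts inicio fim = varreLoop N ts M := by
    intro n
    induction n using Nat.strong_induction_on with
    | _ n ih =>
      intro inicio fim hn h1 h2 h3 h4 h5
      rw [buscaLoop]
      by_cases hif : inicio ≤ fim
      · rw [dif_pos hif]
        have hb := PySem.Int.floordiv_two_mid_bounds hif
        by_cases hge : fatiasObtidas ts (PySem.Int.floordiv (inicio + fim) 2) ≥ N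
        · rw [if_pos hge]
          exact ih (fim + 1 - (PySem.Int.floordiv (inicio + fim) 2 + 1)).toNat (by omega)
            _ fim rfl (by omega) (by omega) h3
            (Or.inr (by rw [show PySem.Int.floordiv (inicio + fim) 2 + 1 - 1 =
              PySem.Int.floordiv (inicio + fim) 2 by ring]; exact hge)) h5
        · rw [if_neg hge]
          apply ih (PySem.Int.floordiv (inicio + fim) 2 - 1 + 1 - inicio).toNat (by omega)
            inicio _ rfl h1 (by omega) (by omega) h4
          intro k hk1 hk2
          exact lt_of_le_of_lt (fatias_antitone ts hts (by omega) (by omega)) (not_le.mp hge)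
      · rw [dif_neg hif]
        have hfe : inicio = fim + 1 := by omega
        by_cases hfim : 1 ≤ fim
        · have h4' : fatiasObtidas ts fim ≥ N := by
            rcases h4 with h4 | h4
            · omega
            · rw [show fim = inicio - 1 by omega]; exact h4
          rw [varreLoop_skip N ts (show (0:Int) ≤ fim by omega) h3 h5]
          rw [varreLoop, if_pos hfim, if_pos h4']
        · have hf0 : fim = 0 := by omega
          subst hf0
          rw [varreLoop_skip N ts (le_refl (0:Int)) h3 h5]
          rw [varreLoop]
          norm_num
  exact key (fim + 1 - inicio).toNat inicio fim rfl h1 h2 h3 h4 h5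

-- element-wise lower bound on floor division by a positive slice size
theorem fd_lower (t m : Int) (hm : 1 ≤ m) :
    (if t < 0 then t else 0) ≤ PySem.Int.floordiv t m := by
  have hm0 : (0:Int) < m := by omega
  by_cases ht : t < 0
  · rw [if_pos ht, PySem.Int.le_floordiv_iff_mul_le hm0]
    nlinarith
  · rw [if_neg ht, PySem.Int.le_floordiv_iff_mul_le hm0]
    omega

-- the slice count is at least the closed-form lower bound of Pre_
theorem fatias_low (ts : List Int) (m : Int) (hm : 1 ≤ m) :
    lowSum ts ≤ fatiasObtidas ts m := by
  unfold fatiasObtidas lowSum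
  rw [PySem.List.foldl_add]
  simp only [zero_add]
  exact List.sum_le_sum fun t _ => fd_lower t m hm

-- when every slice size succeeds, the binary search keeps moving right and returns fim
theorem buscaLoop_allsat (N : Int) (ts : List Int)
    (hall : ∀ m, 1 ≤ m → N ≤ fatiasObtidas ts m) :
    ∀ inicio fim : Int, 1 ≤ inicio → buscaLoop N ts inicio fim = fim := by
  have key : ∀ n : Nat, ∀ inicio fim : Int, (fim + 1 - inicio).toNat = n → 1 ≤ inicio →
      buscaLoop N ts inicio fim = fim := by
    intro n
    induction n using Nat.strong_induction_on with
    | _ n ih =>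
      intro inicio fim hn h1
      rw [buscaLoop]
      by_cases hif : inicio ≤ fim
      · have hb := PySem.Int.floordiv_two_mid_bounds hif
        rw [dif_pos hif, if_pos (hall _ (by omega))]
        exact ih _ (by omega) _ fim rfl (by omega)
      · rw [dif_neg hif]
  exact fun inicio fim h1 => key (fim + 1 - inicio).toNat inicio fim rfl h1

-- ===== VERDICT (by name: the statement is the Claim_ definition above) =====
theorem tamanho_maximo_fatia_spec : Claim_equal_tamanho_maximo_fatia := by
  intro N ts _ hpre
  obtain ⟨hne, hcase⟩ := hpre
  unfold Spec_tamanho_maximo_fatia tamanho_maximo_fatia tamanho_maximo_fatia_alt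
  cases hmax : PySem.List.max? ts (fun y => y) with
  | none => rfl
  | some M =>
    have hmem : M ∈ ts := PySem.List.max?_mem hmax
    have hle : ∀ y ∈ ts, y ≤ M := fun y hy => PySem.List.max?_isMax hmax y hy
    rcases hcase with hts | ⟨⟨t0, ht0m, ht01⟩, hN⟩
    · -- all sizes nonnegative: the slice count is antitone, binary search = jump scan = descending scan
      show buscaLoop N ts 1 M = saltoLoop N ts (M.toNat + 1) M
      have hM0 : 0 ≤ M := hts M hmem
      rw [saltoLoop_eq_varre N ts hne hts (M.toNat + 1) M hM0 (by omega)]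
      exact buscaLoop_eq N ts hts M 1 M le_rfl (by omega) le_rfl
        (Or.inl rfl) (fun k hk1 hk2 => absurd (lt_of_lt_of_le hk1 hk2) (lt_irrefl M))
    · -- N trivially reachable: both sides return the maximum size M at once
      show buscaLoop N ts 1 M = saltoLoop N ts (M.toNat + 1) M
      have hM : 1 ≤ M := le_trans ht01 (hle t0 ht0m)
      have hsat : ∀ m, 1 ≤ m → N ≤ fatiasObtidas ts m :=
        fun m hm => le_trans hN (fatias_low ts m hm)
      rw [buscaLoop_allsat N ts hsat 1 M le_rfl]
      rw [saltoLoop, if_pos hM, if_pos (hsat M hM)]
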